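-- pv_equiv track=rewrite | github.com/textualfactor/Text_Analysis | src/SVD_TF.py | __filter_cleaner
-- ===== SOURCE A (Python) =====
-- def __filter_cleaner(topic):
--     # Function that cleans word comprising topic of symbols
--     # params --
--     # topic: array of words used to determine term_doc_matrix
--     topic_cleaned = []
--     for word in topic:
--         word = word.replace('*','')
--         word = word.replace('-','')
--         word = word.replace("'",'')
--         word = word.replace(",",'')
--         word = word.replace("!",'')
--         word = word.replace("@",'')
--         word = word.replace("#",'')
--         word = word.replace("$",'')
--         word = word.replace("%",'')
--         word = word.replace("&",'')
--         word = word.replace("(",'')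
--         word = word.replace(")",'')
--         if (word != ''):
--             topic_cleaned.append(word)
--     return topic_cleaned
-- ===== SOURCE B (Python) =====
-- _SYMS = frozenset({'*', '-', "'", ',', '!', '@', '#', '$', '%', '&', '(', ')'})
--
-- def __filter_cleaner(topic):
--     topic_cleaned = []
--     for word in topic:
--         cleaned = ''.join(c for c in word if c not in _SYMS)
--         if cleaned:
--             topic_cleaned.append(cleaned)
--     return topic_cleaned
-- ===== Notes on version B (the rewrite author's own statement) =====
-- stated objective: simpler
-- what changed: Replaces eleven sequential single-character str.replace passes per word with one character-level pass that keeps characters not in a precomputed symbol set, appending only nonempty results.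
import Mathlib
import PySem

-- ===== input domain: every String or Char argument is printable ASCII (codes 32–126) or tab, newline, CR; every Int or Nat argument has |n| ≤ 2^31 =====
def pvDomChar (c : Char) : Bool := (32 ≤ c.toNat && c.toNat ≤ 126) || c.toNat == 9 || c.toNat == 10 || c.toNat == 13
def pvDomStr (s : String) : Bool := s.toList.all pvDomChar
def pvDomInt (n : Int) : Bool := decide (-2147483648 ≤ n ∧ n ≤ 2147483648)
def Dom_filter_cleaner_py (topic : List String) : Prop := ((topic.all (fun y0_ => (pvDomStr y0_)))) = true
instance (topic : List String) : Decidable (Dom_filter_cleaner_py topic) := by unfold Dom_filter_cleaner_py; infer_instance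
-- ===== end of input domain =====

-- B replaces A's eleven sequential single-character replace passes per word with one
-- membership-filtering pass over a fixed symbol set (objective: simpler).

set_option maxRecDepth 100000


-- ===== PORT A =====
-- the twelve sequential replace passes of A, kept in A's order
def pvCleanA (w0 : String) : String :=
  let w1 := PySem.Str.replace w0 "*" ""
  let w2 := PySem.Str.replace w1 "-" ""
  let w3 := PySem.Str.replace w2 "'" ""
  let w4 := PySem.Str.replace w3 "," ""
  let w5 := PySem.Str.replace w4 "!" ""
  let w6 := PySem.Str.replace w5 "@" ""
  let w7 := PySem.Str.replace w6 "#" ""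
  let w8 := PySem.Str.replace w7 "$" ""
  let w9 := PySem.Str.replace w8 "%" ""
  let w10 := PySem.Str.replace w9 "&" ""
  let w11 := PySem.Str.replace w10 "(" ""
  PySem.Str.replace w11 ")" ""

def filter_cleaner_py (topic : List String) : List String :=
  topic.foldl (fun topic_cleaned word =>
    let w := pvCleanA word
    if w ≠ "" then topic_cleaned ++ [w] else topic_cleaned) []

-- ===== PORT B =====
-- the fixed symbol set (Python frozenset _SYMS)
def pvSyms : List Char := ['*', '-', '\'', ',', '!', '@', '#', '$', '%', '&', '(', ')']

def filter_cleaner_py_alt (topic : List String) : List String :=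
  topic.foldl (fun topic_cleaned word =>
    let cleaned := String.ofList (word.toList.filter (fun c => !pvSyms.contains c))
    if cleaned ≠ "" then topic_cleaned ++ [cleaned] else topic_cleaned) []

-- ===== PRECONDITION & SPEC =====
def Spec_filter_cleaner_py (topic : List String) (out : List String) : Prop := out = filter_cleaner_py_alt topic
instance (topic : List String) (out : List String) : Decidable (Spec_filter_cleaner_py topic out) := by unfold Spec_filter_cleaner_py; infer_instance

-- ===== CLAIM (what is proved, stated in full; the proofs are below) =====
def Claim_equal_filter_cleaner_py : Prop := ∀ (topic : List String), Dom_filter_cleaner_py topic → Spec_filter_cleaner_py topic (filter_cleaner_py topic)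

-- ===== LEMMAS AND PROOFS =====

-- Chars.replace.go with a one-character pattern and empty replacement is a filter
theorem pv_go_filter (c : Char) : ∀ (fuel : Nat) (l acc : List Char), l.length ≤ fuel →
    PySem.Chars.replace.go [c] [] fuel l acc = acc.reverse ++ l.filter (fun a => a ≠ c) := by
  intro fuel
  induction fuel with
  | zero =>
    intro l acc h
    have : l = [] := List.eq_nil_of_length_eq_zero (Nat.le_zero.1 h)
    subst this
    simp [PySem.Chars.replace.go]
  | succ n ih =>
    intro l acc h
    cases l with
    | nil => simp [PySem.Chars.replace.go]
    | cons x t =>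
      simp only [PySem.Chars.replace.go]
      by_cases hx : x = c
      · subst hx
        have : List.isPrefixOf [x] (x :: t) = true := by simp [List.isPrefixOf]
        rw [if_pos this]
        simp only [List.length, List.drop]
        rw [ih t _ (by simpa using h)]
        simp [List.filter]
      · have : List.isPrefixOf [c] (x :: t) = false := by
          simp only [List.isPrefixOf, Bool.and_eq_false_iff]
          left
          simp
          exact fun he => absurd he.symm hx
        rw [this]
        simp only [Bool.false_eq_true, if_false]
        rw [ih t _ (by simpa using h)]
        simp [List.filter, hx]

-- Str.replace with a one-character pattern and "" deletes exactly that character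
theorem pv_replace_filter (w p : String) (c : Char) (hp : p.toList = [c]) :
    (PySem.Str.replace w p "").toList = w.toList.filter (fun a => a ≠ c) := by
  rw [PySem.Str.toList_replace, hp]
  rw [show ("" : String).toList = [] from rfl]
  simp only [PySem.Chars.replace]
  rw [show ([c] : List Char).isEmpty = false from rfl]
  simp only [Bool.false_eq_true, if_false]
  exact pv_go_filter c w.toList.length w.toList [] (le_refl _)

-- A's twelve passes over one word produce exactly B's single filtering pass
set_option maxRecDepth 100000 in
theorem pv_clean_eq (w : String) :
    pvCleanA w = String.ofList (w.toList.filter (fun c => !pvSyms.contains c)) := by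
  rw [← String.toList_inj, String.toList_ofList]
  simp only [pvCleanA]
  rw [pv_replace_filter _ ")" ')' rfl, pv_replace_filter _ "(" '(' rfl,
      pv_replace_filter _ "&" '&' rfl, pv_replace_filter _ "%" '%' rfl,
      pv_replace_filter _ "$" '$' rfl, pv_replace_filter _ "#" '#' rfl,
      pv_replace_filter _ "@" '@' rfl, pv_replace_filter _ "!" '!' rfl,
      pv_replace_filter _ "," ',' rfl, pv_replace_filter _ "'" '\'' rfl,
      pv_replace_filter _ "-" '-' rfl, pv_replace_filter _ "*" '*' rfl]
  simp only [List.filter_filter]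
  apply List.filter_congr
  intro a _
  simp only [pvSyms, List.contains_cons, List.contains_nil, Bool.or_false, Bool.not_or,
    decide_not, beq_eq_decide]
  ac_rfl

theorem pv_foldl_eq (topic : List String) (acc : List String) :
    topic.foldl (fun topic_cleaned word =>
      let w := pvCleanA word
      if w ≠ "" then topic_cleaned ++ [w] else topic_cleaned) acc =
    topic.foldl (fun topic_cleaned word =>
      let cleaned := String.ofList (word.toList.filter (fun c => !pvSyms.contains c))
      if cleaned ≠ "" then topic_cleaned ++ [cleaned] else topic_cleaned) acc := by
  induction topic generalizing acc with
  | nil => simp only [List.foldl_nil]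
  | cons w t ih =>
    simp only [List.foldl_cons]
    rw [pv_clean_eq w]
    exact ih _

-- ===== VERDICT (by name: the statement is the Claim_ definition above) =====
theorem filter_cleaner_py_spec : Claim_equal_filter_cleaner_py := by
  intro topic _
  unfold Spec_filter_cleaner_py filter_cleaner_py filter_cleaner_py_alt
  exact pv_foldl_eq topic []
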